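-- pv_equiv track=rewrite | github.com/Ideadly-Skies/Sty_Stack_II | reverse_some_chars.py | reverse_some_chars
-- ===== SOURCE A (Python) =====
-- def reverse_some_chars(s, chars):
--     # transform chars to dict keys
--     char_dict = dict.fromkeys(chars, "")
--
--     # append target to stack
--     stack = []
--     for char in s:
--         # O(1) lookup for target string
--         if char in char_dict:
--             stack.append(char)
--
--     # reverse string
--     reverse_str = ""
--     for char in s:
--         # O(1) lookup for target string
--         if char in char_dict:
--             reverse_str += stack.pop()
--         else:
--             reverse_str += char
--
--     # reverse_str order
--     return reverse_str
-- ===== SOURCE B (Python) =====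
-- def reverse_some_chars(s, chars):
--     # Two-pointer in-place reversal of the targeted characters, single pass.
--     targets = set(chars)
--     lst = list(s)
--     i, j = 0, len(lst) - 1
--     while i < j:
--         if lst[i] not in targets:
--             i += 1
--         elif lst[j] not in targets:
--             j -= 1
--         else:
--             lst[i], lst[j] = lst[j], lst[i]
--             i += 1
--             j -= 1
--     return ''.join(lst)
-- ===== Notes on version B (the rewrite author's own statement) =====
-- stated objective: alternative
-- what changed: Replaces A's two passes (collect targeted chars on a stack, then rebuild the string popping from it) with a single two-pointer in-place swap over a char list.
import Mathlib
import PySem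

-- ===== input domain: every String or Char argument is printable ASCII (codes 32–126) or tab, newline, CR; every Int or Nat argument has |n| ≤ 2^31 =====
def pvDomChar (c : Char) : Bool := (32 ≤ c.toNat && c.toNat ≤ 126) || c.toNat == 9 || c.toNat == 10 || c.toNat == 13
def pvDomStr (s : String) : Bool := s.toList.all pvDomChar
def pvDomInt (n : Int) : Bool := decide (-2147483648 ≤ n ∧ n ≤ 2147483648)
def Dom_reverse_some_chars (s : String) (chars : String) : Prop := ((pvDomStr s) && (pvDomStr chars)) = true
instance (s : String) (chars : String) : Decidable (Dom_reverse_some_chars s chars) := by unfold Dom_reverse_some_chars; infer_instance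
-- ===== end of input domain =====

-- B replaces A's two passes (stack of targeted chars, then rebuild popping from it) with a
-- single two-pointer in-place swap over a char list; same O(n) cost, different algorithm.


-- ===== PORT A =====
def reverse_some_chars (s : String) (chars : String) : String :=
  -- char_dict = dict.fromkeys(chars, "")
  let char_dict : PySem.Dict Char String :=
    chars.toList.foldl (fun d c => d.insert c "") PySem.Dict.empty
  -- stack = []; for char in s: if char in char_dict: stack.append(char)
  let stack : List Char :=
    s.toList.foldl (fun st c => if char_dict.contains c then st ++ [c] else st) []
  -- reverse_str = ""; for char in s: … reverse_str += stack.pop() / char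
  let res :=
    s.toList.foldl (fun (acc : List Char × List Char) c =>
      if char_dict.contains c then
        match PySem.List.pop? acc.2 with
        | some (x, st') => (acc.1 ++ [x], st')
        | none => (acc.1, acc.2)   -- unreachable: the stack holds exactly the targeted chars still to come
      else (acc.1 ++ [c], acc.2)) (([] : List Char), stack)
  String.ofList res.1

-- ===== PORT B =====
-- while i < j: advance i past non-targets, retreat j past non-targets, else swap both
def tpLoop (T : PySem.Set Char) (l : List Char) (i j : Int) : List Char :=
  if _h : i < j then
    match PySem.List.pyGet? l i, PySem.List.pyGet? l j with
    | some a, some b =>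
      if !(T.contains a) then tpLoop T l (i + 1) j
      else if !(T.contains b) then tpLoop T l i (j - 1)
      else tpLoop T (PySem.List.pySetD (PySem.List.pySetD l i b) j a) (i + 1) (j - 1)
    | _, _ => l
  else l
termination_by (j - i).toNat
decreasing_by all_goals omega

def reverse_some_chars_alt (s : String) (chars : String) : String :=
  String.ofList (tpLoop (PySem.Set.ofList chars.toList) s.toList 0 ((s.toList.length : Int) - 1))

-- ===== PRECONDITION & SPEC =====
def Spec_reverse_some_chars (s : String) (chars : String) (out : String) : Prop := out = reverse_some_chars_alt s chars
instance (s : String) (chars : String) (out : String) : Decidable (Spec_reverse_some_chars s chars out) := by unfold Spec_reverse_some_chars; infer_instance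

-- ===== CLAIM (what is proved, stated in full; the proofs are below) =====
def Claim_equal_reverse_some_chars : Prop := ∀ (s : String) (chars : String), Dom_reverse_some_chars s chars → Spec_reverse_some_chars s chars (reverse_some_chars s chars)

-- ===== LEMMAS AND PROOFS =====

-- Canonical description of the result: the targeted positions of l receive, in order,
-- the elements of q (used with q = reverse of the targeted subsequence).
def splice (p : Char → Bool) : List Char → List Char → List Char
  | [], _ => []
  | c :: cs, q =>
    if p c then
      match q with
      | x :: q' => x :: splice p cs q'
      | [] => c :: splice p cs []
    else c :: splice p cs q

def revSub (p : Char → Bool) (l : List Char) : List Char :=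
  splice p l ((l.filter p).reverse)

lemma splice_append (p : Char → Bool) (l1 l2 : List Char) :
    ∀ q : List Char, (l1.filter p).length ≤ q.length →
      splice p (l1 ++ l2) q = splice p l1 q ++ splice p l2 (q.drop (l1.filter p).length) := by
  induction l1 with
  | nil => intro q _; simp [splice]
  | cons c cs ih =>
    intro q hq
    cases hp : p c with
    | true =>
      cases q with
      | nil => simp [hp] at hq
      | cons x q' =>
        simp only [List.cons_append, splice, hp, if_pos]
        simp only [List.filter_cons, hp, if_pos, List.length_cons] at hq ⊢
        rw [ih q' (by omega)]
        simp [List.drop]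
    | false =>
      simp only [List.cons_append, splice, hp, Bool.false_eq_true, if_false]
      simp only [List.filter_cons, hp, Bool.false_eq_true, if_false] at hq ⊢
      rw [ih q hq]

lemma splice_append_right (p : Char → Bool) (l : List Char) :
    ∀ q r : List Char, (l.filter p).length = q.length →
      splice p l (q ++ r) = splice p l q := by
  induction l with
  | nil => intro q r _; simp [splice]
  | cons c cs ih =>
    intro q r hq
    cases hp : p c with
    | true =>
      cases q with
      | nil => simp [hp] at hq
      | cons x q' =>
        simp only [List.cons_append, splice, hp, if_pos]
        simp only [List.filter_cons, hp, if_pos, List.length_cons] at hq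
        rw [ih q' r (by omega)]
    | false =>
      simp only [splice, hp, Bool.false_eq_true, if_false]
      simp only [List.filter_cons, hp, Bool.false_eq_true, if_false] at hq
      rw [ih q r hq]

lemma revSub_nil (p : Char → Bool) : revSub p [] = [] := rfl

lemma revSub_singleton (p : Char → Bool) (c : Char) : revSub p [c] = [c] := by
  cases hp : p c <;> simp [revSub, splice, hp]

lemma revSub_cons_neg (p : Char → Bool) (c : Char) (l : List Char) (hc : p c = false) :
    revSub p (c :: l) = c :: revSub p l := by
  simp [revSub, splice, hc]

lemma revSub_snoc_neg (p : Char → Bool) (d : Char) (l : List Char) (hd : p d = false) :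
    revSub p (l ++ [d]) = revSub p l ++ [d] := by
  unfold revSub
  have hf : (l ++ [d]).filter p = l.filter p := by simp [hd]
  rw [hf, splice_append p l [d] _ (by simp)]
  have : ((l.filter p).reverse).drop (l.filter p).length = [] := by simp
  rw [this]
  simp [splice, hd]

lemma revSub_swap (p : Char → Bool) (c d : Char) (l : List Char)
    (hc : p c = true) (hd : p d = true) :
    revSub p (c :: (l ++ [d])) = d :: (revSub p l ++ [c]) := by
  unfold revSub
  have hf : (c :: (l ++ [d])).filter p = c :: (l.filter p ++ [d]) := by
    simp [hc, hd]
  rw [hf]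
  have hrev : (c :: (l.filter p ++ [d])).reverse = d :: ((l.filter p).reverse ++ [c]) := by
    simp
  rw [hrev]
  simp only [splice, hc, if_pos]
  rw [splice_append p l [d] _ (by simp)]
  have hdrop : ((l.filter p).reverse ++ [c]).drop (l.filter p).length = [c] := by
    rw [List.drop_append_of_le_length (by simp)]
    simp
  rw [hdrop, splice_append_right p l _ [c] (by simp)]
  simp [splice, hd]

lemma set_append_length (pre : List Char) (a v : Char) (rest : List Char) :
    (pre ++ a :: rest).set pre.length v = pre ++ v :: rest := by
  simp

-- two-pointer loop correctness: on the window [pre.length, pre.length + mid.length - 1]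
-- it reverses exactly the targeted subsequence of mid
lemma tpLoop_correct (T : PySem.Set Char) :
    ∀ (n : Nat) (mid pre post : List Char), mid.length ≤ n →
      tpLoop T (pre ++ mid ++ post) (pre.length : Int)
          ((pre.length : Int) + (mid.length : Int) - 1)
        = pre ++ revSub (fun c => T.contains c) mid ++ post := by
  intro n
  induction n with
  | zero =>
    intro mid pre post hlen
    have hm : mid = [] := List.eq_nil_of_length_eq_zero (by omega)
    subst hm
    rw [tpLoop, dif_neg (by simp only [List.length_nil]; push_cast; omega)]
    rw [revSub_nil]
  | succ n ih =>
    intro mid pre post hlen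
    rcases mid with _ | ⟨c, rest⟩
    · rw [tpLoop, dif_neg (by simp only [List.length_nil]; push_cast; omega)]
      rw [revSub_nil]
    rcases List.eq_nil_or_concat rest with rfl | ⟨ms, d, rfl⟩
    · -- mid = [c]
      rw [tpLoop, dif_neg (by simp only [List.length_cons, List.length_nil]; push_cast; omega)]
      rw [revSub_singleton]
    rw [List.concat_eq_append] at hlen ⊢
    have hlen2 : (c :: (ms ++ [d])).length = ms.length + 2 := by simp
    have hij : (pre.length : Int) < (pre.length : Int) + ((c :: (ms ++ [d])).length : Int) - 1 := by
      rw [hlen2]; push_cast; omega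
    rw [tpLoop, dif_pos hij]
    have hgi : PySem.List.pyGet? (pre ++ (c :: (ms ++ [d])) ++ post) (pre.length : Int) = some c := by
      have h1 : pre ++ (c :: (ms ++ [d])) ++ post = pre ++ c :: (ms ++ [d] ++ post) := by simp
      rw [h1, PySem.List.pyGet?_append_length]
    have hjcast : (pre.length : Int) + ((c :: (ms ++ [d])).length : Int) - 1
        = (((pre ++ c :: ms).length : Nat) : Int) := by
      rw [hlen2]; push_cast; simp; omega
    have hgj : PySem.List.pyGet? (pre ++ (c :: (ms ++ [d])) ++ post)
        ((pre.length : Int) + ((c :: (ms ++ [d])).length : Int) - 1) = some d := by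
      have hsplit : pre ++ (c :: (ms ++ [d])) ++ post = (pre ++ c :: ms) ++ d :: post := by simp
      rw [hjcast, hsplit, PySem.List.pyGet?_append_length]
    cases hc : T.contains c with
    | false =>
      simp only [hgi, hgj, hc, Bool.not_false, if_true]
      have heq : pre ++ (c :: (ms ++ [d])) ++ post = (pre ++ [c]) ++ (ms ++ [d]) ++ post := by simp
      have hi1 : (pre.length : Int) + 1 = (((pre ++ [c]).length : Nat) : Int) := by
        push_cast; simp
      have hj1 : (pre.length : Int) + ((c :: (ms ++ [d])).length : Int) - 1
          = (((pre ++ [c]).length : Nat) : Int) + (((ms ++ [d]).length : Nat) : Int) - 1 := by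
        push_cast; simp; ring
      rw [heq, hi1, hj1, ih (ms ++ [d]) (pre ++ [c]) post (by simp at hlen ⊢; omega)]
      rw [revSub_cons_neg _ c (ms ++ [d]) hc]
      simp only [List.append_assoc, List.singleton_append, List.cons_append, List.nil_append]
      try rfl
    | true =>
      cases hd : T.contains d with
      | false =>
        simp only [hgi, hgj, hc, hd, Bool.not_true, Bool.not_false, Bool.false_eq_true, if_false, if_true]
        have heq : pre ++ (c :: (ms ++ [d])) ++ post = pre ++ (c :: ms) ++ (d :: post) := by simp
        have hj1 : (pre.length : Int) + ((c :: (ms ++ [d])).length : Int) - 1 - 1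
            = (pre.length : Int) + (((c :: ms).length : Nat) : Int) - 1 := by
          push_cast; simp; ring
        rw [heq, hj1, ih (c :: ms) pre (d :: post) (by simp at hlen ⊢; omega)]
        have hrs : revSub (fun c => T.contains c) (c :: (ms ++ [d]))
            = revSub (fun c => T.contains c) (c :: ms) ++ [d] := by
          have h2 := revSub_snoc_neg (fun c => T.contains c) d (c :: ms) hd
          simpa only [List.cons_append] using h2
        rw [hrs]
        simp only [List.append_assoc, List.singleton_append, List.cons_append, List.nil_append]
        try rfl
      | true =>
        simp only [hgi, hgj, hc, hd, Bool.not_true, Bool.false_eq_true, if_false]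
        have hset1 : PySem.List.pySetD (pre ++ (c :: (ms ++ [d])) ++ post) (pre.length : Int) d
            = pre ++ d :: (ms ++ [d] ++ post) := by
          have h1 : pre ++ (c :: (ms ++ [d])) ++ post = pre ++ c :: (ms ++ [d] ++ post) := by simp
          rw [h1, PySem.List.pySetD_natCast, set_append_length]
        have hset2 : PySem.List.pySetD (pre ++ d :: (ms ++ [d] ++ post))
            ((pre.length : Int) + ((c :: (ms ++ [d])).length : Int) - 1) c
            = (pre ++ d :: ms) ++ c :: post := by
          have hsplit : pre ++ d :: (ms ++ [d] ++ post) = (pre ++ d :: ms) ++ d :: post := by simp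
          have hlen3 : ((pre ++ c :: ms).length : Int) = ((pre ++ d :: ms).length : Int) := by simp
          rw [hjcast, hlen3, hsplit, PySem.List.pySetD_natCast, set_append_length]
        rw [hset1, hset2]
        have heq : (pre ++ d :: ms) ++ c :: post = (pre ++ [d]) ++ ms ++ (c :: post) := by simp
        have hi1 : (pre.length : Int) + 1 = (((pre ++ [d]).length : Nat) : Int) := by
          push_cast; simp
        have hj1 : (pre.length : Int) + ((c :: (ms ++ [d])).length : Int) - 1 - 1
            = (((pre ++ [d]).length : Nat) : Int) + ((ms.length : Nat) : Int) - 1 := by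
          push_cast; simp; ring
        rw [heq, hi1, hj1, ih ms (pre ++ [d]) (c :: post) (by simp at hlen ⊢; omega)]
        have hrs : revSub (fun c => T.contains c) (c :: (ms ++ [d]))
            = d :: (revSub (fun c => T.contains c) ms ++ [c]) :=
          revSub_swap _ c d ms hc hd
        rw [hrs]
        simp only [List.append_assoc, List.singleton_append, List.cons_append, List.nil_append]
        try rfl

-- A's first loop builds exactly the targeted subsequence
lemma stack_eq (p : Char → Bool) (l : List Char) :
    ∀ st0 : List Char, l.foldl (fun st c => if p c then st ++ [c] else st) st0
      = st0 ++ l.filter p := by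
  induction l with
  | nil => intro st0; simp
  | cons c cs ih =>
    intro st0
    cases hp : p c <;> simp [List.foldl_cons, hp, ih]

-- A's second loop, popping from the end of the stack, computes splice over the reversed stack
lemma aloop (p : Char → Bool) :
    ∀ (l : List Char) (acc st : List Char), (l.filter p).length ≤ st.length →
      (l.foldl (fun (acc : List Char × List Char) c =>
        if p c then
          match PySem.List.pop? acc.2 with
          | some (x, st') => (acc.1 ++ [x], st')
          | none => (acc.1, acc.2)
        else (acc.1 ++ [c], acc.2)) (acc, st)).1 = acc ++ splice p l st.reverse := by
  intro l
  induction l with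
  | nil => intro acc st _; simp [splice]
  | cons c cs ih =>
    intro acc st h
    cases hp : p c with
    | true =>
      rcases List.eq_nil_or_concat st with rfl | ⟨st'', x, rfl⟩
      · simp [hp] at h
      · simp only [List.concat_eq_append] at h ⊢
        simp only [List.foldl_cons, hp, if_pos, PySem.List.pop?_last]
        simp only [List.filter_cons, hp, if_pos, List.length_cons] at h
        rw [ih (acc ++ [x]) st'' (by simp at h ⊢; omega)]
        simp [splice, hp]
    | false =>
      simp only [List.foldl_cons, hp, Bool.false_eq_true, if_false]
      simp only [List.filter_cons, hp, Bool.false_eq_true, if_false] at h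
      rw [ih (acc ++ [c]) st h]
      simp [splice, hp]

-- the dict built by A and the set built by B test the same membership
lemma dict_contains_eq (chars : String) (c : Char) :
    (chars.toList.foldl (fun d c => d.insert c ("" : String)) PySem.Dict.empty).contains c
      = (PySem.Set.ofList chars.toList).contains c := by
  rw [PySem.Dict.contains_eq_decide_mem_keys]
  have hk : (chars.toList.foldl (fun d c => d.insert c ("" : String)) PySem.Dict.empty).keys
      = PySem.Set.ofList chars.toList := by
    have := PySem.Dict.keys_foldl_insert chars.toList (fun _ _ => ("" : String)) PySem.Dict.empty
    simpa [PySem.Set.update_nil_left] using this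
  rw [hk]
  simp [PySem.Set.contains]

lemma a_eq (s chars : String) :
    reverse_some_chars s chars
      = String.ofList (revSub (fun c => (PySem.Set.ofList chars.toList).contains c) s.toList) := by
  unfold reverse_some_chars
  simp only [dict_contains_eq]
  rw [stack_eq (fun c => (PySem.Set.ofList chars.toList).contains c) s.toList []]
  rw [aloop (fun c => (PySem.Set.ofList chars.toList).contains c) s.toList []
      ([] ++ List.filter (fun c => (PySem.Set.ofList chars.toList).contains c) s.toList)
      (by simp only [List.nil_append]; exact le_refl _)]
  simp only [List.nil_append, revSub]

lemma b_eq (s chars : String) :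
    reverse_some_chars_alt s chars
      = String.ofList (revSub (fun c => (PySem.Set.ofList chars.toList).contains c) s.toList) := by
  unfold reverse_some_chars_alt
  have h := tpLoop_correct (PySem.Set.ofList chars.toList) s.toList.length s.toList [] []
    (le_refl _)
  simp only [List.nil_append, List.append_nil, List.length_nil, Nat.cast_zero, zero_add] at h
  rw [h]

-- ===== VERDICT (by name: the statement is the Claim_ definition above) =====
theorem reverse_some_chars_spec : Claim_equal_reverse_some_chars := by
  intro s chars _
  unfold Spec_reverse_some_chars
  rw [a_eq, b_eq]
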